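-- pv_equiv track=rewrite | github.com/wjhou/ORGan | src/graph_construction/pmi_ngram.py | strip_stopwords
-- ===== SOURCE A (Python) =====
-- def strip_stopwords(units, stopwords):
--     start = 0
--     while start < len(units):
--         if units[start] not in stopwords:
--             break
--         start += 1
--     end = len(units) - 1
--     while end > start:
--         if units[end] not in stopwords:
--             break
--         end -= 1
--     return units[start : end + 1]
-- ===== SOURCE B (Python) =====
-- def strip_stopwords(units, stopwords):
--     idxs = [i for i, u in enumerate(units) if u not in stopwords]
--     if not idxs:
--         return units[0:0]
--     return units[idxs[0] : idxs[-1] + 1]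
-- ===== Notes on version B (the rewrite author's own statement) =====
-- stated objective: simpler
-- what changed: Replaces the two early-breaking pointer loops (one from each end) with a single forward pass collecting the indices of all non-stopword units, then one slice from the first to the last such index (empty slice if none).
import Mathlib
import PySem

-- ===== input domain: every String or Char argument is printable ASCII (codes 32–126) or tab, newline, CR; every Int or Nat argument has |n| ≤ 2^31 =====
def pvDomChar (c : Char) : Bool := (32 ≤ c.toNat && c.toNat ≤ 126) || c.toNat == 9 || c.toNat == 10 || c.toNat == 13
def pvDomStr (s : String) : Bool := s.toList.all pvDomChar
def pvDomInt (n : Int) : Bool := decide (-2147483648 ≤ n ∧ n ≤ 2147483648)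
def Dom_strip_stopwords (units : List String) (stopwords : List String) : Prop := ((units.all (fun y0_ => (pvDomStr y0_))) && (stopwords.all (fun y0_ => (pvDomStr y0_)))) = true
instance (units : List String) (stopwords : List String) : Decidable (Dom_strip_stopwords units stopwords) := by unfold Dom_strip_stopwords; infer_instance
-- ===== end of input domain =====

-- B replaces A's two early-breaking pointer loops with one forward index pass and a single slice (objective: simpler).

-- ===== PORT A =====
-- while start < len(units): if units[start] not in stopwords: break; start += 1
def stripALoopStart (units : List String) (stopwords : List String) (start : Nat) : Nat :=
  if h : start < units.length then
    if ¬ stopwords.contains units[start] then start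
    else stripALoopStart units stopwords (start + 1)
  else start
termination_by units.length - start

-- while end > start: if units[end] not in stopwords: break; end -= 1
def stripALoopEnd (units : List String) (stopwords : List String) (start : Nat) (e : Int) : Int :=
  if (start : Int) < e then
    if ¬ stopwords.contains ((PySem.List.pyGet? units e).getD "") then e
    else stripALoopEnd units stopwords start (e - 1)
  else e
termination_by e.toNat
decreasing_by simp at *; omega

-- return units[start : end + 1]
def stripAReturn (units : List String) (stopwords : List String) (start : Nat) : List String :=
  PySem.List.slice units (some (start : Int))
    (some (stripALoopEnd units stopwords start ((units.length : Int) - 1) + 1))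

def strip_stopwords (units : List String) (stopwords : List String) : List String :=
  stripAReturn units stopwords (stripALoopStart units stopwords 0)

-- ===== PORT B =====
-- idxs = [i for i, u in enumerate(units) if u not in stopwords]
def pvIdxs (units : List String) (stopwords : List String) : List Int :=
  ((PySem.List.enumerate units 0).filter (fun p => ¬ stopwords.contains p.2)).map (·.1)

def strip_stopwords_alt (units : List String) (stopwords : List String) : List String :=
  match pvIdxs units stopwords with
  | [] => PySem.List.slice units (some 0) (some 0)
  | i0 :: rest => PySem.List.slice units (some i0) (some ((i0 :: rest).getLast (by simp) + 1))

-- ===== PRECONDITION & SPEC =====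
def Spec_strip_stopwords (units : List String) (stopwords : List String) (out : List String) : Prop := out = strip_stopwords_alt units stopwords
instance (units : List String) (stopwords : List String) (out : List String) : Decidable (Spec_strip_stopwords units stopwords out) := by unfold Spec_strip_stopwords; infer_instance

-- ===== CLAIM (what is proved, stated in full; the proofs are below) =====
def Claim_equal_strip_stopwords : Prop := ∀ (units : List String) (stopwords : List String), Dom_strip_stopwords units stopwords → Spec_strip_stopwords units stopwords (strip_stopwords units stopwords)

-- ===== LEMMAS AND PROOFS =====

lemma pvIdxs_mem (units stopwords : List String) (i : Int) :
    i ∈ pvIdxs units stopwords ↔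
      ∃ k : Nat, k < units.length ∧ i = (k : Int) ∧ stopwords.contains (units.getD k "") = false := by
  simp only [pvIdxs, List.mem_map, List.mem_filter, PySem.List.mem_enumerate_iff]
  constructor
  · rintro ⟨p, ⟨⟨k, hk, rfl⟩, hq⟩, rfl⟩
    refine ⟨k, hk, by simp, ?_⟩
    simp only [decide_not, Bool.not_eq_true', decide_eq_false_iff_not] at hq
    simpa [List.getD_eq_getElem?_getD, List.getElem?_eq_getElem hk] using
      (by simpa using hq)
  · rintro ⟨k, hk, rfl, hc⟩
    refine ⟨((0 : Int) + k, units[k]), ⟨⟨k, hk, rfl⟩, ?_⟩, by simp⟩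
    simp only [decide_not, Bool.not_eq_true', decide_eq_false_iff_not]
    simpa [List.getD_eq_getElem?_getD, List.getElem?_eq_getElem hk] using hc

lemma pvIdxs_pairwise (units stopwords : List String) :
    (pvIdxs units stopwords).Pairwise (· < ·) := by
  unfold pvIdxs
  rw [List.pairwise_map]
  exact (PySem.List.pairwise_lt_enumerate units 0).filter _

lemma pv_le_getLast {l : List Int} (hp : l.Pairwise (· < ·)) {x : Int} (hx : x ∈ l)
    (h : l ≠ []) : x ≤ l.getLast h := by
  induction l with
  | nil => simp at hx
  | cons a t ih =>
    rcases List.pairwise_cons.mp hp with ⟨ha, ht⟩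
    cases t with
    | nil => simp at hx; simp [hx]
    | cons b u =>
      rw [List.getLast_cons (by simp)]
      rcases List.mem_cons.mp hx with rfl | hxt
      · exact le_of_lt (ha _ (List.getLast_mem _))
      · exact ih ht hxt _

lemma pvStart_spec (units stopwords : List String) (s : Nat) (hs : s ≤ units.length) :
    s ≤ stripALoopStart units stopwords s ∧
    stripALoopStart units stopwords s ≤ units.length ∧
    (∀ i, s ≤ i → i < stripALoopStart units stopwords s →
      stopwords.contains (units.getD i "") = true) ∧
    (stripALoopStart units stopwords s < units.length →
      stopwords.contains (units.getD (stripALoopStart units stopwords s) "") = false) := by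
  fun_induction stripALoopStart units stopwords s with
  | case1 s h hnc =>
    refine ⟨le_refl _, le_of_lt h, fun i h1 h2 => absurd h1 (by omega), fun _ => ?_⟩
    simpa [List.getD_eq_getElem?_getD, List.getElem?_eq_getElem h] using
      (by simpa using hnc)
  | case2 s h hc ih =>
    have := ih (by omega)
    refine ⟨by omega, this.2.1, fun i h1 h2 => ?_, this.2.2.2⟩
    rcases Nat.eq_or_lt_of_le h1 with rfl | h1'
    · simp only [not_not] at hc
      simpa [List.getD_eq_getElem?_getD, List.getElem?_eq_getElem h] using hc
    · exact this.2.2.1 i (by omega) h2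
  | case3 s h =>
    exact ⟨le_refl _, by omega, fun i h1 h2 => absurd h1 (by omega), fun hh => absurd hh (by omega)⟩

lemma pvEnd_spec (units stopwords : List String) (st : Nat) (e : Int)
    (he : (st : Int) ≤ e) (hlen : e < units.length) :
    (st : Int) ≤ stripALoopEnd units stopwords st e ∧
    stripALoopEnd units stopwords st e ≤ e ∧
    (∀ i : Int, stripALoopEnd units stopwords st e < i → i ≤ e →
      stopwords.contains (units.getD i.toNat "") = true) ∧
    ((st : Int) < stripALoopEnd units stopwords st e →
      stopwords.contains (units.getD (stripALoopEnd units stopwords st e).toNat "") = false) := by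
  fun_induction stripALoopEnd units stopwords st e with
  | case1 e h hnc =>
    refine ⟨le_of_lt h, le_refl _, fun i h1 h2 => absurd h1 (by omega), fun _ => ?_⟩
    have h0 : (0 : Int) ≤ e := by omega
    have hg : PySem.List.pyGet? units e = some units[e.toNat] :=
      PySem.List.pyGet?_eq_some_getElem units h0 (by omega)
    simp only [hg, Option.getD_some] at hnc
    have het : e.toNat < units.length := by omega
    simpa [List.getD_eq_getElem?_getD, List.getElem?_eq_getElem het] using (by simpa using hnc)
  | case2 e h hc ih =>
    have hrec := ih (by omega) (by omega)
    refine ⟨hrec.1, by omega, fun i h1 h2 => ?_, hrec.2.2.2⟩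
    rcases eq_or_lt_of_le h2 with rfl | h2'
    · have h0 : (0 : Int) ≤ i := by omega
      have hg : PySem.List.pyGet? units i = some units[i.toNat] :=
        PySem.List.pyGet?_eq_some_getElem units h0 (by omega)
      simp only [hg, Option.getD_some, not_not] at hc
      have het : i.toNat < units.length := by omega
      simpa [List.getD_eq_getElem?_getD, List.getElem?_eq_getElem het] using hc
    · exact hrec.2.2.1 i h1 (by omega)
  | case3 e h =>
    exact ⟨by omega, le_refl _, fun i h1 h2 => absurd h1 (by omega), fun hh => absurd hh (by omega)⟩

-- ===== VERDICT (by name: the statement is the Claim_ definition above) =====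
theorem strip_stopwords_spec : Claim_equal_strip_stopwords := by
  intro units stopwords _
  unfold Spec_strip_stopwords strip_stopwords stripAReturn strip_stopwords_alt
  have hstart := pvStart_spec units stopwords 0 (Nat.zero_le _)
  set R0 := stripALoopStart units stopwords 0 with hR0
  cases hidxs : pvIdxs units stopwords with
  | nil =>
    have hall : ∀ k, k < units.length → stopwords.contains (units.getD k "") = true := by
      intro k hk
      by_contra hkc
      have : (k : Int) ∈ pvIdxs units stopwords :=
        (pvIdxs_mem units stopwords k).2 ⟨k, hk, rfl, Bool.eq_false_iff.mpr hkc⟩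
      simp [hidxs] at this
    have hR0len : R0 = units.length := by
      rcases Nat.lt_or_ge R0 units.length with h | h
      · have h1 := hstart.2.2.2 h
        have h2 := hall R0 h
        rw [h1] at h2
        cases h2
      · omega
    have hE : stripALoopEnd units stopwords R0 ((units.length : Int) - 1) =
        (units.length : Int) - 1 := by
      rw [stripALoopEnd]
      simp [hR0len]
    rw [hE, hR0len]
    have h1 : ((units.length : Int) - 1) + 1 = ((units.length : Nat) : Int) := by ring
    rw [h1, PySem.List.slice_natCast]
    simp [PySem.List.slice_to]
  | cons i0 rest =>
    have hi0mem : i0 ∈ pvIdxs units stopwords := by simp [hidxs]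
    rcases (pvIdxs_mem units stopwords i0).1 hi0mem with ⟨k0, hk0, rfl, hc0⟩
    have hpw := pvIdxs_pairwise units stopwords
    have hR0le : R0 ≤ k0 := by
      by_contra h
      have h1 := hstart.2.2.1 k0 (Nat.zero_le _) (by omega)
      rw [hc0] at h1
      cases h1
    have hR0lt : R0 < units.length := by omega
    have hR0mem : (R0 : Int) ∈ pvIdxs units stopwords :=
      (pvIdxs_mem units stopwords R0).2 ⟨R0, hR0lt, rfl, hstart.2.2.2 hR0lt⟩
    have hk0le : ((k0 : Nat) : Int) ≤ (R0 : Int) := by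
      rw [hidxs] at hR0mem hpw
      rcases List.mem_cons.mp hR0mem with h | h
      · omega
      · have := (List.pairwise_cons.mp hpw).1 _ h
        omega
    have hR0k0 : R0 = k0 := by omega
    have hend := pvEnd_spec units stopwords R0 ((units.length : Int) - 1)
      (by omega) (by omega)
    set R1 := stripALoopEnd units stopwords R0 ((units.length : Int) - 1) with hR1
    set L := (pvIdxs units stopwords).getLast (by simp [hidxs]) with hL
    have hLmem : L ∈ pvIdxs units stopwords := List.getLast_mem _
    rcases (pvIdxs_mem units stopwords L).1 hLmem with ⟨kL, hkL, hLeq, hcL⟩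
    have hmax : ∀ j ∈ pvIdxs units stopwords, j ≤ L :=
      fun j hj => pv_le_getLast (pvIdxs_pairwise units stopwords) hj _
    have hk0L : ((k0 : Nat) : Int) ≤ L := hmax _ hi0mem
    have hLR1 : L ≤ R1 := by
      by_contra h
      have h1 := hend.2.2.1 L (by omega) (by omega)
      rw [hLeq] at h1
      simp only [Int.toNat_natCast] at h1
      rw [hcL] at h1
      cases h1
    have hR1L : R1 ≤ L := by
      rcases eq_or_lt_of_le hend.1 with h | h
      · omega
      · have hc1 := hend.2.2.2 h
        have h0 : (0 : Int) ≤ R1 := by omega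
        have hmem : R1 ∈ pvIdxs units stopwords := by
          have h2 : ((R1.toNat : Nat) : Int) ∈ pvIdxs units stopwords :=
            (pvIdxs_mem units stopwords _).2 ⟨R1.toNat, by omega, rfl, hc1⟩
          rwa [Int.toNat_of_nonneg h0] at h2
        exact hmax _ hmem
    have hR1eq : R1 = L := le_antisymm hR1L hLR1
    have hgl : (((k0 : Nat) : Int) :: rest).getLast (by simp) = L := by
      rw [hL]
      exact List.getLast_congr _ _ hidxs.symm
    rw [hR0k0, hR1eq, ← hgl]
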